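-- pv_equiv track=rewrite | github.com/ChipFlow/vajax | tests/xyce_test_registry.py | _detect_device_types
-- ===== SOURCE A (Python) =====
-- from typing import Dict, List, Optional, Set
--
-- def _detect_device_types(content: str) -> Set[str]:
--     """Detect device types used in the netlist.
--
--     Args:
--         content: Netlist content
--
--     Returns:
--         Set of device type names
--     """
--     device_types: Set[str] = set()
--
--     # Device patterns (first character of instance name)
--     device_patterns = {
--         'r': 'resistor',
--         'c': 'capacitor',
--         'l': 'inductor',
--         'd': 'diode',
--         'm': 'mosfet',
--         'q': 'bjt',
--         'j': 'jfet',
--         'v': 'vsource',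
--         'i': 'isource',
--         'e': 'vcvs',
--         'f': 'cccs',
--         'g': 'vccs',
--         'h': 'ccvs',
--         'x': 'subckt',
--         'b': 'bsource',
--         't': 'tline',
--         'y': 'pde',  # Xyce-specific PDE device
--         'p': 'digital',  # Xyce digital device
--         'u': 'mutual_inductor',
--         'k': 'coupling',
--     }
--
--     for line in content.split('\n'):
--         line = line.strip().lower()
--         # Skip comments and directives
--         if line.startswith('*') or line.startswith('.') or not line:
--             continue
--
--         first_char = line[0] if line else ''
--         if first_char in device_patterns:
--             device_types.add(device_patterns[first_char])
--
--     return device_types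
-- ===== SOURCE B (Python) =====
-- from typing import Dict, List, Optional, Set
--
-- def _detect_device_types(content: str) -> Set[str]:
--     """Two-pass variant: first collect the distinct leading characters of the
--     relevant netlist lines, then translate that small character index through
--     the device-pattern table."""
--     device_patterns = {
--         'r': 'resistor', 'c': 'capacitor', 'l': 'inductor', 'd': 'diode',
--         'm': 'mosfet', 'q': 'bjt', 'j': 'jfet', 'v': 'vsource',
--         'i': 'isource', 'e': 'vcvs', 'f': 'cccs', 'g': 'vccs',
--         'h': 'ccvs', 'x': 'subckt', 'b': 'bsource', 't': 'tline',
--         'y': 'pde', 'p': 'digital', 'u': 'mutual_inductor', 'k': 'coupling',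
--     }
--
--     # Pass 1: distinct first characters of non-blank, non-comment, non-directive lines.
--     first_chars: List[str] = []
--     for raw in content.split('\n'):
--         line = raw.strip().lower()
--         if not line or line[0] in '*.':
--             continue
--         if line[0] not in first_chars:
--             first_chars.append(line[0])
--
--     # Pass 2: translate the (at most ~90) seen characters through the table.
--     device_types: Set[str] = set()
--     for ch in first_chars:
--         if ch in device_patterns:
--             device_types.add(device_patterns[ch])
--     return device_types
-- ===== Notes on version B (the rewrite author's own statement) =====
-- stated objective: alternative
-- what changed: Replaces A's single fused loop (filter + dict lookup + set insert per line) by two passes: first build the ordered index of distinct leading characters of relevant lines, then translate only that small character index through the pattern table.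
import Mathlib
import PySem

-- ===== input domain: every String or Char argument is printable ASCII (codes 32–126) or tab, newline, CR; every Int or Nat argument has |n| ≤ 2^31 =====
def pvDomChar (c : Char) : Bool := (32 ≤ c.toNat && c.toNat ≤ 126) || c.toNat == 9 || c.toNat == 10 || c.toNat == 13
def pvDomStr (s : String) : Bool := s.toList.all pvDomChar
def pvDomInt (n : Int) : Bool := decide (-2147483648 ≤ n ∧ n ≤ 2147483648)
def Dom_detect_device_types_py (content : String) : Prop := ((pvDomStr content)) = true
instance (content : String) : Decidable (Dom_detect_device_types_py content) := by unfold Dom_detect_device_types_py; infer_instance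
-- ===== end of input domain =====

-- B replaces A's fused line loop by two passes: collect the distinct leading characters
-- of relevant lines first, then translate that small character index through the table.

-- ===== PORT A =====
-- the device_patterns dict (keys are the one-character instance-name prefixes)
def pvPatterns : PySem.Dict String String :=
  PySem.Dict.ofList
    [("r", "resistor"), ("c", "capacitor"), ("l", "inductor"), ("d", "diode"),
     ("m", "mosfet"), ("q", "bjt"), ("j", "jfet"), ("v", "vsource"),
     ("i", "isource"), ("e", "vcvs"), ("f", "cccs"), ("g", "vccs"),
     ("h", "ccvs"), ("x", "subckt"), ("b", "bsource"), ("t", "tline"),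
     ("y", "pde"), ("p", "digital"), ("u", "mutual_inductor"), ("k", "coupling")]

-- the body of A's loop over the lines
def pvStepA (device_types : PySem.Set String) (rawline : String) : PySem.Set String :=
  let line := PySem.Str.lower (PySem.Str.strip rawline)
  if PySem.Str.startswith line "*" || PySem.Str.startswith line "." || line == "" then
    device_types
  else
    let first_char : String :=          -- line[0] if line else ''
      match PySem.Str.pyGet? line 0 with
      | some c => String.ofList [c]
      | none => ""
    if pvPatterns.contains first_char then
      PySem.Set.add device_types (pvPatterns.getD first_char "")
    else device_types

def detect_device_types_py (content : String) : List String :=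
  -- content.split('\n'): sep ≠ "" so split? is always some
  ((PySem.Str.split? content "\n").getD []).foldl pvStepA PySem.Set.empty

-- ===== PORT B =====
-- the body of pass 1's loop over the lines
def pvStepB (first_chars : PySem.Set String) (rawline : String) : PySem.Set String :=
  match (PySem.Str.lower (PySem.Str.strip rawline)).toList with
  | [] => first_chars
  | c :: _ =>                            -- line[0] in '*.' is a one-character comparison
    if c == '*' || c == '.' then first_chars
    else PySem.Set.add first_chars (String.ofList [c])

-- pass 1: ordered set of first characters (as one-character strings) of the relevant lines
def pvFirstChars (content : String) : PySem.Set String :=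
  ((PySem.Str.split? content "\n").getD []).foldl pvStepB PySem.Set.empty

-- the body of pass 2's loop over the seen characters
def pvStepT (device_types : PySem.Set String) (ch : String) : PySem.Set String :=
  match pvPatterns.get? ch with
  | some name => PySem.Set.add device_types name
  | none => device_types

-- pass 2: translate the seen characters through the pattern table
def pvTranslate (first_chars : List String) : List String :=
  first_chars.foldl pvStepT PySem.Set.empty

def detect_device_types_py_alt (content : String) : List String :=
  pvTranslate (pvFirstChars content)

-- ===== PRECONDITION & SPEC =====
def Spec_detect_device_types_py (content : String) (out : List String) : Prop := out = detect_device_types_py_alt content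
instance (content : String) (out : List String) : Decidable (Spec_detect_device_types_py content out) := by unfold Spec_detect_device_types_py; infer_instance

-- ===== CLAIM (what is proved, stated in full; the proofs are below) =====
def Claim_equal_detect_device_types_py : Prop := ∀ (content : String), Dom_detect_device_types_py content → Spec_detect_device_types_py content (detect_device_types_py content)

-- ===== LEMMAS AND PROOFS =====

theorem pvTranslate_eq_foldl (cs : List String) :
    pvTranslate cs = cs.foldl pvStepT PySem.Set.empty := rfl

theorem pvMem_foldl_stepT (cs : List String) (out : PySem.Set String) (x : String)
    (hx : x ∈ out) : x ∈ cs.foldl pvStepT out := by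
  induction cs generalizing out with
  | nil => exact hx
  | cons c cs ih =>
    apply ih
    simp only [pvStepT]
    cases pvPatterns.get? c with
    | none => exact hx
    | some name => exact (PySem.Set.mem_add _ _ _).2 (Or.inl hx)

theorem pvHit_foldl_stepT (cs : List String) (out : PySem.Set String) (c name : String)
    (hc : c ∈ cs) (hn : pvPatterns.get? c = some name) : name ∈ cs.foldl pvStepT out := by
  induction cs generalizing out with
  | nil => cases hc
  | cons c' cs ih =>
    rcases List.mem_cons.1 hc with h | h
    · subst h
      rw [List.foldl_cons]
      apply pvMem_foldl_stepT
      simp only [pvStepT, hn]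
      exact (PySem.Set.mem_add _ _ _).2 (Or.inr rfl)
    · exact ih _ h

-- adding one seen character commutes with translation: it is exactly A's per-line update
theorem pvTranslate_add (cs : PySem.Set String) (k : String) :
    pvTranslate (PySem.Set.add cs k) =
      (if pvPatterns.contains k then
        PySem.Set.add (pvTranslate cs) (pvPatterns.getD k "")
      else pvTranslate cs) := by
  by_cases hk : k ∈ cs
  · rw [PySem.Set.add_of_mem hk]
    rw [PySem.Dict.contains_eq_isSome_get?]
    cases hg : pvPatterns.get? k with
    | none => rfl
    | some name =>
      rw [PySem.Dict.getD_of_get?_eq_some _ _ hg]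
      simp only [Option.isSome_some, if_true]
      exact (PySem.Set.add_of_mem (pvHit_foldl_stepT cs _ k name hk hg)).symm
  · rw [PySem.Set.add_of_not_mem hk, pvTranslate_eq_foldl, List.foldl_append]
    rw [← pvTranslate_eq_foldl]
    simp only [List.foldl_cons, List.foldl_nil, pvStepT]
    rw [PySem.Dict.contains_eq_isSome_get?]
    cases hg : pvPatterns.get? k with
    | none => rfl
    | some name =>
      rw [PySem.Dict.getD_of_get?_eq_some _ _ hg]
      rfl

-- one line of A's loop, on a state of the form 'pvTranslate cs', is one line of B's pass 1 translated
theorem pvStep_line (cs : PySem.Set String) (rawline : String) :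
    pvStepA (pvTranslate cs) rawline = pvTranslate (pvStepB cs rawline) := by
  unfold pvStepA pvStepB
  set line := PySem.Str.lower (PySem.Str.strip rawline) with hline
  clear_value line
  cases hl : line.toList with
  | nil =>
    have hnil : line = "" := String.toList_eq_nil_iff.mp hl
    subst hnil
    simp
  | cons c rest =>
    have hne : line ≠ "" := by
      intro h; rw [h] at hl; simp at hl
    have hbe : (line == "") = false := by simpa using hne
    have hsw : ∀ p : Char, PySem.Str.startswith line (String.ofList [p]) = (c == p) := by
      intro p
      rw [PySem.Str.startswith_eq, hl]
      show PySem.Chars.startswith (c :: rest) ((String.ofList [p]).toList) = (c == p)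
      have hp : (String.ofList [p]).toList = [p] := by simp
      rw [hp]
      simp only [PySem.Chars.startswith, List.isPrefixOf, Bool.and_true]
      cases hpc : (p == c) <;> cases hcp : (c == p) <;> simp_all
    have hget : PySem.Str.pyGet? line 0 = some c := by
      rw [PySem.Str.pyGet?_eq, PySem.Chars.pyGet?_eq_listPyGet?, hl]
      simp [PySem.List.pyGet?, PySem.List.pyIdx?]
    have h1 : PySem.Str.startswith line "*" = (c == '*') := hsw '*'
    have h2 : PySem.Str.startswith line "." = (c == '.') := hsw '.'
    simp only [h1, h2, hbe, hget, Bool.or_false]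
    cases hcd : (c == '*' || c == '.') with
    | true => simp
    | false =>
      simp only [Bool.false_eq_true, if_false]
      exact (pvTranslate_add cs (String.ofList [c])).symm

theorem pvLoop (ls : List String) (cs : PySem.Set String) :
    ls.foldl pvStepA (pvTranslate cs) = pvTranslate (ls.foldl pvStepB cs) := by
  induction ls generalizing cs with
  | nil => simp only [List.foldl_nil]
  | cons l ls ih =>
    simp only [List.foldl_cons]
    rw [pvStep_line cs l]
    exact ih _

-- ===== VERDICT (by name: the statement is the Claim_ definition above) =====
theorem detect_device_types_py_spec : Claim_equal_detect_device_types_py := by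
  intro content _
  show detect_device_types_py content = detect_device_types_py_alt content
  unfold detect_device_types_py detect_device_types_py_alt pvFirstChars
  exact pvLoop _ PySem.Set.empty
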